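-- pv_equiv track=rewrite | github.com/wm389751584x/leetcodeformeng | 815_numBusesToDestination_1.py | numBusesToDestination
-- ===== SOURCE A (Python) =====
-- import collections
-- from typing import List
--
-- def numBusesToDestination(routes: List[List[int]], source: int, target: int) -> int:
--
--     graph = collections.defaultdict(set)
--
--     for bus, route in enumerate(routes):
--         for stop in route:
--             graph[stop].add(bus)
--
--     ans = 0
--     visited_stops = set()
--     visited_bus = set()
--     queue = collections.deque([source])
--
--     visited_stops.add(source)
--
--     while queue:
--         for _ in range(len(queue)):
--             stop = queue.popleft()
--
--             if stop == target:
--                 return ans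
--
--             for bus in graph[stop]:
--                 if bus not in visited_bus:
--                     for new_stop in routes[bus]:
--                         if new_stop not in visited_stops:
--                             queue.append(new_stop)
--                             visited_stops.add(new_stop)
--         ans += 1
--
--     return -1
-- ===== SOURCE B (Python) =====
-- def numBusesToDestination(routes, source, target):
--     # Level-synchronous BFS over buses: each round fires every not-yet-used
--     # route that touches a reached stop, removing fired routes from the pool.
--     if source == target:
--         return 0
--     reached = {source}
--     remaining = list(routes)
--     ans = 0
--     while True:
--         ans += 1
--         fired = [r for r in remaining if any(s in reached for s in r)]
--         remaining = [r for r in remaining if not any(s in reached for s in r)]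
--         new_stops = [s for r in fired for s in r]
--         if target in new_stops:
--             return ans
--         if all(s in reached for s in new_stops):
--             return -1
--         for s in new_stops:
--             reached.add(s)
-- ===== Notes on version B (the rewrite author's own statement) =====
-- stated objective: faster
-- what changed: A does a per-stop BFS over a stop-to-bus graph and rescans a bus's whole route every time any of its stops is popped (its visited_bus set is never filled); B drops the graph and the queue and runs a level-synchronous BFS over bus routes, firing each route at most once and removing it from the pool.
import Mathlib
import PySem

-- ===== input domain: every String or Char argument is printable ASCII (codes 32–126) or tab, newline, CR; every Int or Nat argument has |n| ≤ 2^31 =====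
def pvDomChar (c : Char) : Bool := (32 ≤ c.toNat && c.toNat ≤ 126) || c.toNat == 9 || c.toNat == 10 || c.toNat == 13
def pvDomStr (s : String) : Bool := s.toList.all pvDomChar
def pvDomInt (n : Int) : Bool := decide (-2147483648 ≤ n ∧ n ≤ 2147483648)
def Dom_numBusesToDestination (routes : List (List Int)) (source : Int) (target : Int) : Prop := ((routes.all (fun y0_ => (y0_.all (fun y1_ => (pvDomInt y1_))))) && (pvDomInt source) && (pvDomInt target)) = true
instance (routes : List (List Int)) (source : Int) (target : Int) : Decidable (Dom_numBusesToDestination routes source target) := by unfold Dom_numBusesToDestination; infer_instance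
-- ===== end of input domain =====

-- B replaces A's per-stop BFS (stop→bus graph, deque of stops, routes rescanned whenever any
-- of their stops is popped, since visited_bus is never filled) by a level-synchronous BFS over
-- bus routes in which a fired route leaves the pool permanently; equal return value everywhere.

-- ===== PORT A =====
-- graph = defaultdict(set); for bus, route in enumerate(routes): for stop in route: graph[stop].add(bus)
def pvGraph (routes : List (List Int)) : PySem.Dict Int (PySem.Set Int) :=
  (PySem.List.enumerate routes).foldl
    (fun g br => br.2.foldl
      (fun g stop => g.insert stop (PySem.Set.add ((g.get? stop).getD PySem.Set.empty) br.1)) g)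
    PySem.Dict.empty

-- for new_stop in routes[bus]: if new_stop not in visited_stops: queue.append(new_stop); visited_stops.add(new_stop)
-- state = (stops appended to the queue this level, visited_stops)
def pvScanList (r : List Int) (st : List Int × PySem.Set Int) : List Int × PySem.Set Int :=
  r.foldl (fun st ns => if PySem.Set.contains st.2 ns then st
                        else (st.1 ++ [ns], PySem.Set.add st.2 ns)) st

-- routes[bus]: bus always comes out of the graph, hence in range; pyGetD is exact there
def pvScanBus (routes : List (List Int)) (bus : Int) (st : List Int × PySem.Set Int) :
    List Int × PySem.Set Int :=
  pvScanList (PySem.List.pyGetD routes bus []) st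

-- for bus in graph[stop]: if bus not in visited_bus: …   (visited_bus is never added to in A)
def pvProcessStop (routes : List (List Int)) (g : PySem.Dict Int (PySem.Set Int))
    (visBus : PySem.Set Int) (stop : Int) (st : List Int × PySem.Set Int) :
    List Int × PySem.Set Int :=
  ((g.get? stop).getD PySem.Set.empty).foldl
    (fun st bus => if PySem.Set.contains visBus bus then st else pvScanBus routes bus st) st

-- for _ in range(len(queue)): stop = queue.popleft(); if stop == target: return ans (= none); …
def pvLevel (routes : List (List Int)) (g : PySem.Dict Int (PySem.Set Int))
    (visBus : PySem.Set Int) (target : Int) :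
    List Int → List Int × PySem.Set Int → Option (List Int × PySem.Set Int)
  | [], st => some st
  | stop :: rest, st =>
      if stop = target then none
      else pvLevel routes g visBus target rest (pvProcessStop routes g visBus stop st)

-- while queue: … ; ans += 1.  Fuel routes.length + 2 provably suffices: every level whose next
-- queue is nonempty permanently exhausts at least one route (established inside pvMain below).
def pvBfs (routes : List (List Int)) (g : PySem.Dict Int (PySem.Set Int))
    (visBus : PySem.Set Int) (target : Int) :
    Nat → List Int → PySem.Set Int → Int → Int
  | 0, _, _, _ => -1
  | fuel + 1, q, vis, ans =>
      if q = [] then -1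
      else
        match pvLevel routes g visBus target q ([], vis) with
        | none => ans
        | some (q', vis') => pvBfs routes g visBus target fuel q' vis' (ans + 1)

def numBusesToDestination (routes : List (List Int)) (source : Int) (target : Int) : Int :=
  pvBfs routes (pvGraph routes) PySem.Set.empty target (routes.length + 2)
    [source] (PySem.Set.add PySem.Set.empty source) 0

-- ===== PORT B =====
-- any(s in reached for s in r)
def pvTouches (reached : PySem.Set Int) (r : List Int) : Bool :=
  r.any (fun s => PySem.Set.contains reached s)

-- fired = [r for r in remaining if any(s in reached for s in r)]
def pvFired (reached : PySem.Set Int) (remaining : List (List Int)) : List (List Int) :=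
  remaining.filter (fun r => pvTouches reached r)

-- remaining = [r for r in remaining if not any(s in reached for s in r)]
def pvRest (reached : PySem.Set Int) (remaining : List (List Int)) : List (List Int) :=
  remaining.filter (fun r => ! pvTouches reached r)

-- new_stops = [s for r in fired for s in r]
def pvNewStops (reached : PySem.Set Int) (remaining : List (List Int)) : List Int :=
  (pvFired reached remaining).flatMap (fun r => r)

-- the while True loop of B
def pvRounds (target : Int) (reached : PySem.Set Int) (remaining : List (List Int)) (ans : Int) : Int :=
  if target ∈ pvNewStops reached remaining then ans + 1
  else if (pvNewStops reached remaining).all (fun s => PySem.Set.contains reached s) then -1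
  else pvRounds target ((pvNewStops reached remaining).foldl PySem.Set.add reached)
         (pvRest reached remaining) (ans + 1)
termination_by remaining.length
decreasing_by
  rename_i _h1 h2
  have hex : ∃ s ∈ pvNewStops reached remaining, PySem.Set.contains reached s = false := by
    by_contra hcon
    apply h2
    refine List.all_eq_true.2 fun x hx => ?_
    rcases Bool.eq_false_or_eq_true (PySem.Set.contains reached x) with h | h
    · exact h
    · exact absurd ⟨x, hx, h⟩ hcon
  obtain ⟨s, hsNS, _⟩ := hex
  rw [pvNewStops, pvFired, List.mem_flatMap] at hsNS
  obtain ⟨r, hr, _⟩ := hsNS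
  rw [List.mem_filter] at hr
  rw [pvRest]
  exact List.length_filter_lt_length_iff_exists.mpr ⟨r, hr.1, by simp [hr.2]⟩

def numBusesToDestination_alt (routes : List (List Int)) (source : Int) (target : Int) : Int :=
  if source = target then 0
  else pvRounds target (PySem.Set.add PySem.Set.empty source) routes 0

-- ===== PRECONDITION & SPEC =====
def Spec_numBusesToDestination (routes : List (List Int)) (source : Int) (target : Int) (out : Int) : Prop := out = numBusesToDestination_alt routes source target
instance (routes : List (List Int)) (source : Int) (target : Int) (out : Int) : Decidable (Spec_numBusesToDestination routes source target out) := by unfold Spec_numBusesToDestination; infer_instance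

-- ===== CLAIM (what is proved, stated in full; the proofs are below) =====
def Claim_equal_numBusesToDestination : Prop := ∀ (routes : List (List Int)) (source : Int) (target : Int), Dom_numBusesToDestination routes source target → Spec_numBusesToDestination routes source target (numBusesToDestination routes source target)

-- ===== LEMMAS AND PROOFS =====

lemma pvContains_iff (s : PySem.Set Int) (x : Int) : PySem.Set.contains s x = true ↔ x ∈ s := by
  simp [PySem.Set.contains]

-- the graph built by A: the bucket of `stop` holds exactly the indices of the routes containing `stop`
lemma pvGraph_inner (i : Int) (r : List Int) :
    ∀ (g : PySem.Dict Int (PySem.Set Int)) (stop bus : Int),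
    bus ∈ ((r.foldl (fun g s => g.insert s (PySem.Set.add ((g.get? s).getD PySem.Set.empty) i)) g).get? stop).getD PySem.Set.empty
      ↔ bus ∈ ((g.get? stop).getD PySem.Set.empty) ∨ (bus = i ∧ stop ∈ r) := by
  induction r with
  | nil => simp
  | cons s r ih =>
    intro g stop bus
    rw [List.foldl_cons, ih]
    by_cases h : stop = s
    · subst h
      rw [PySem.Dict.get?_insert_self]
      simp [PySem.Set.mem_add]
      tauto
    · rw [PySem.Dict.get?_insert_of_ne _ _ h]
      simp [h]

lemma pvGraph_outer (pairs : List (Int × List Int)) :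
    ∀ (g : PySem.Dict Int (PySem.Set Int)) (stop bus : Int),
    bus ∈ ((pairs.foldl (fun g br => br.2.foldl (fun g s => g.insert s (PySem.Set.add ((g.get? s).getD PySem.Set.empty) br.1)) g) g).get? stop).getD PySem.Set.empty
      ↔ bus ∈ ((g.get? stop).getD PySem.Set.empty) ∨ ∃ p ∈ pairs, bus = p.1 ∧ stop ∈ p.2 := by
  induction pairs with
  | nil => simp
  | cons p ps ih =>
    intro g stop bus
    rw [List.foldl_cons, ih, pvGraph_inner]
    simp only [List.exists_mem_cons_iff]
    tauto

lemma pvGraph_mem (routes : List (List Int)) (stop bus : Int) :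
    bus ∈ (((pvGraph routes).get? stop).getD PySem.Set.empty)
      ↔ ∃ k : Nat, k < routes.length ∧ bus = (k : Int) ∧ stop ∈ routes.getD k [] := by
  unfold pvGraph
  rw [pvGraph_outer]
  constructor
  · rintro (h | ⟨p, hp, rfl, hs⟩)
    · simp [PySem.Dict.empty, PySem.Dict.get?] at h
    · obtain ⟨k, hk, rfl⟩ := (PySem.List.mem_enumerate_iff _ _ _).1 hp
      refine ⟨k, hk, by simp, ?_⟩
      rw [List.getD_eq_getElem _ _ hk]
      simpa using hs
  · rintro ⟨k, hk, rfl, hs⟩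
    refine Or.inr ⟨((0 : Int) + (k : Int), routes[k]), ?_, by simp, ?_⟩
    · exact (PySem.List.mem_enumerate_iff _ _ _).2 ⟨k, hk, rfl⟩
    · rw [List.getD_eq_getElem _ _ hk] at hs
      simpa using hs

-- reachability in one bus ride from a stop, as A's graph sees it
def pvReach (routes : List (List Int)) (g : PySem.Dict Int (PySem.Set Int)) (s x : Int) : Prop :=
  ∃ b ∈ ((g.get? s).getD PySem.Set.empty), x ∈ PySem.List.pyGetD routes b []

lemma pvReach_iff (routes : List (List Int)) (stop x : Int) :
    pvReach routes (pvGraph routes) stop x ↔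
      ∃ k : Nat, k < routes.length ∧ stop ∈ routes.getD k [] ∧ x ∈ routes.getD k [] := by
  unfold pvReach
  constructor
  · rintro ⟨b, hb, hx⟩
    obtain ⟨k, hk, rfl, hs⟩ := (pvGraph_mem routes stop b).1 hb
    refine ⟨k, hk, hs, ?_⟩
    rw [PySem.List.pyGetD_natCast] at hx
    exact hx
  · rintro ⟨k, hk, hs, hx⟩
    refine ⟨(k : Int), (pvGraph_mem routes stop (k : Int)).2 ⟨k, hk, rfl, hs⟩, ?_⟩
    rw [PySem.List.pyGetD_natCast]
    exact hx

-- the inner new_stop loop: membership characterisation of the resulting (queue, visited)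
lemma pvScanList_mem (r : List Int) :
    ∀ (st : List Int × PySem.Set Int) (x : Int),
    (x ∈ (pvScanList r st).2 ↔ x ∈ st.2 ∨ x ∈ r) ∧
    (x ∈ (pvScanList r st).1 ↔ x ∈ st.1 ∨ (x ∈ r ∧ x ∉ st.2)) := by
  induction r with
  | nil => simp [pvScanList]
  | cons n r ih =>
    intro st x
    have step : pvScanList (n :: r) st
        = pvScanList r (if PySem.Set.contains st.2 n then st
                        else (st.1 ++ [n], PySem.Set.add st.2 n)) := by
      simp [pvScanList]
    rw [step]
    by_cases h : PySem.Set.contains st.2 n = true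
    · have hn : n ∈ st.2 := (pvContains_iff _ _).1 h
      rw [if_pos h]
      have h1 := (ih st x).1
      have h2 := (ih st x).2
      constructor
      · refine h1.trans ?_
        by_cases hx : x = n
        · subst hx; simp [hn]
        · simp [List.mem_cons, hx]
      · refine h2.trans ?_
        by_cases hx : x = n
        · subst hx; simp [hn]
        · simp [List.mem_cons, hx]
    · have hn : n ∉ st.2 := fun hm => h ((pvContains_iff _ _).2 hm)
      rw [if_neg h]
      have h1 := (ih (st.1 ++ [n], PySem.Set.add st.2 n) x).1
      have h2 := (ih (st.1 ++ [n], PySem.Set.add st.2 n) x).2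
      simp only [PySem.Set.mem_add, List.mem_append, List.mem_singleton] at h1 h2
      constructor
      · refine h1.trans ?_
        simp only [List.mem_cons]
        tauto
      · refine h2.trans ?_
        simp only [List.mem_cons]
        by_cases hx : x = n
        · subst hx; simp [hn]
        · simp only [hx]
          tauto

-- the bus loop over one stop's bucket (visited_bus is empty in A)
set_option maxHeartbeats 1000000 in
lemma pvBuses_mem (routes : List (List Int)) (bs : List Int) :
    ∀ (st : List Int × PySem.Set Int) (x : Int),
    (x ∈ (bs.foldl (fun st bus => if PySem.Set.contains PySem.Set.empty bus then st
                                  else pvScanList (PySem.List.pyGetD routes bus []) st) st).2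
        ↔ x ∈ st.2 ∨ ∃ b ∈ bs, x ∈ PySem.List.pyGetD routes b []) ∧
    (x ∈ (bs.foldl (fun st bus => if PySem.Set.contains PySem.Set.empty bus then st
                                  else pvScanList (PySem.List.pyGetD routes bus []) st) st).1
        ↔ x ∈ st.1 ∨ ((∃ b ∈ bs, x ∈ PySem.List.pyGetD routes b []) ∧ x ∉ st.2)) := by
  induction bs with
  | nil => simp
  | cons b bs ih =>
    intro st x
    have hc : PySem.Set.contains PySem.Set.empty b = false := by
      simp [PySem.Set.contains, PySem.Set.empty]
    rw [List.foldl_cons]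
    simp only [hc, Bool.false_eq_true, if_false]
    have hscan := pvScanList_mem (PySem.List.pyGetD routes b []) st x
    have hih := ih (pvScanList (PySem.List.pyGetD routes b []) st) x
    constructor
    · rw [hih.1, hscan.1]
      simp only [List.exists_mem_cons_iff]
      tauto
    · rw [hih.2, hscan.2, hscan.1]
      simp only [List.exists_mem_cons_iff]
      tauto

lemma pvProcessStop_mem (routes : List (List Int)) (g : PySem.Dict Int (PySem.Set Int))
    (stop : Int) (st : List Int × PySem.Set Int) (x : Int) :
    (x ∈ (pvProcessStop routes g PySem.Set.empty stop st).2 ↔ x ∈ st.2 ∨ pvReach routes g stop x) ∧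
    (x ∈ (pvProcessStop routes g PySem.Set.empty stop st).1
        ↔ x ∈ st.1 ∨ (pvReach routes g stop x ∧ x ∉ st.2)) := by
  unfold pvProcessStop pvReach
  simp only [pvScanBus]
  exact pvBuses_mem routes _ st x

-- popping the whole level: early return exactly when target is in the queue …
set_option maxHeartbeats 1000000 in
lemma pvLevel_none (routes : List (List Int)) (g : PySem.Dict Int (PySem.Set Int)) (target : Int)
    (q : List Int) :
    ∀ st, target ∈ q → pvLevel routes g PySem.Set.empty target q st = none := by
  induction q with
  | nil => simp
  | cons s q ih =>
    intro st hmem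
    by_cases h : s = target
    · simp only [pvLevel]
      rw [if_pos h]
    · simp only [pvLevel]
      rw [if_neg h]
      exact ih _ (by rcases List.mem_cons.1 hmem with h' | h'
                     · exact absurd h'.symm h
                     · exact h')

-- … otherwise it returns the state whose membership is "old ∨ reached from some queue stop"
set_option maxHeartbeats 1000000 in
lemma pvLevel_some (routes : List (List Int)) (g : PySem.Dict Int (PySem.Set Int)) (target : Int)
    (q : List Int) :
    ∀ st, (∀ s ∈ q, s ≠ target) →
    ∃ st', pvLevel routes g PySem.Set.empty target q st = some st' ∧ ∀ x,
      (x ∈ st'.2 ↔ x ∈ st.2 ∨ ∃ s ∈ q, pvReach routes g s x) ∧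
      (x ∈ st'.1 ↔ x ∈ st.1 ∨ ((∃ s ∈ q, pvReach routes g s x) ∧ x ∉ st.2)) := by
  induction q with
  | nil =>
    intro st _
    exact ⟨st, rfl, by simp⟩
  | cons s q ih =>
    intro st hq
    obtain ⟨st', heq, hchar⟩ := ih (pvProcessStop routes g PySem.Set.empty s st)
      (fun s' hs' => hq s' (List.mem_cons_of_mem _ hs'))
    refine ⟨st', ?_, ?_⟩
    · simp only [pvLevel]
      rw [if_neg (hq s List.mem_cons_self), heq]
    · intro x
      have hp := pvProcessStop_mem routes g s st x
      have hc := hchar x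
      constructor
      · rw [hc.1, hp.1]
        simp only [List.exists_mem_cons_iff]
        tauto
      · rw [hc.2, hp.2, hp.1]
        simp only [List.exists_mem_cons_iff]
        tauto

-- B-side membership characterisations
lemma pvNewStops_mem (reached : PySem.Set Int) (rem : List (List Int)) (x : Int) :
    x ∈ pvNewStops reached rem ↔ ∃ r ∈ rem, (∃ s ∈ r, s ∈ reached) ∧ x ∈ r := by
  simp only [pvNewStops, pvFired, pvTouches, List.mem_flatMap, List.mem_filter,
    List.any_eq_true, pvContains_iff]
  tauto

lemma pvFoldAdd_mem (reached : PySem.Set Int) (l : List Int) (x : Int) :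
    x ∈ l.foldl PySem.Set.add reached ↔ x ∈ reached ∨ x ∈ l := by
  have h : l.foldl PySem.Set.add reached = PySem.Set.update reached l := rfl
  rw [h, PySem.Set.mem_update]

-- the main correspondence: A's per-level queue/visited state against B's reached/remaining state
set_option maxHeartbeats 1000000 in
lemma pvMain (routes : List (List Int)) (target : Int) :
    ∀ (fuel : Nat) (q : List Int) (vis reached : PySem.Set Int) (rem : List (List Int)) (ans : Int),
    (∀ x, x ∈ vis ↔ x ∈ reached) →
    (∀ x ∈ q, x ∈ vis) →
    target ∉ vis →
    (∀ r ∈ rem, r ∈ routes) →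
    (∀ r ∈ rem, ∀ s ∈ r, s ∈ vis → s ∈ q) →
    (∀ k : Nat, k < routes.length → routes.getD k [] ∈ rem ∨ ∀ s ∈ routes.getD k [], s ∈ vis) →
    q ≠ [] →
    rem.length + 2 ≤ fuel →
    pvBfs routes (pvGraph routes) PySem.Set.empty target fuel q vis ans
      = pvRounds target reached rem ans := by
  intro fuel
  induction fuel with
  | zero => intro q vis reached rem ans _ _ _ _ _ _ _ hf; omega
  | succ f ih =>
    intro q vis reached rem ans h1 h2 h3 h4 h5 h6 h7 hf
    have hne : ∀ s ∈ q, s ≠ target := fun s hs heq => h3 (heq ▸ h2 s hs)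
    obtain ⟨st', hlev, hchar⟩ := pvLevel_some routes (pvGraph routes) target q ([], vis) hne
    obtain ⟨q', vis'⟩ := st'
    have hA : pvBfs routes (pvGraph routes) PySem.Set.empty target (f + 1) q vis ans
        = pvBfs routes (pvGraph routes) PySem.Set.empty target f q' vis' (ans + 1) := by
      simp only [pvBfs]
      rw [if_neg h7, hlev]
    have hvis' : ∀ x, x ∈ vis' ↔ x ∈ vis ∨ ∃ s ∈ q, pvReach routes (pvGraph routes) s x :=
      fun x => (hchar x).1
    have hq' : ∀ x, x ∈ q' ↔ (∃ s ∈ q, pvReach routes (pvGraph routes) s x) ∧ x ∉ vis := by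
      intro x
      have := (hchar x).2
      simpa using this
    have hNQ : ∀ x, (∃ s ∈ q, pvReach routes (pvGraph routes) s x) →
        (x ∈ vis ∨ x ∈ pvNewStops reached rem) := by
      rintro x ⟨s, hsq, hr⟩
      obtain ⟨k, hk, hs, hx⟩ := (pvReach_iff routes s x).1 hr
      rcases h6 k hk with hin | hsub
      · right
        rw [pvNewStops_mem]
        exact ⟨routes.getD k [], hin, ⟨s, hs, (h1 s).1 (h2 s hsq)⟩, hx⟩
      · left; exact hsub x hx
    have hNS' : ∀ x, x ∈ pvNewStops reached rem →
        (x ∈ vis ∨ ∃ s ∈ q, pvReach routes (pvGraph routes) s x) := by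
      intro x hx
      rw [pvNewStops_mem] at hx
      obtain ⟨r, hr, ⟨s, hsr, hsreach⟩, hxr⟩ := hx
      have hsv : s ∈ vis := (h1 s).2 hsreach
      have hsq : s ∈ q := h5 r hr s hsr hsv
      obtain ⟨k, hk, hrk⟩ := List.mem_iff_getElem.1 (h4 r hr)
      right
      refine ⟨s, hsq, (pvReach_iff routes s x).2 ⟨k, hk, ?_, ?_⟩⟩
      · rw [List.getD_eq_getElem _ _ hk, hrk]; exact hsr
      · rw [List.getD_eq_getElem _ _ hk, hrk]; exact hxr
    have hq'NS : ∀ x, x ∈ q' ↔ (x ∈ pvNewStops reached rem ∧ x ∉ reached) := by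
      intro x
      rw [hq' x]
      constructor
      · rintro ⟨hreach, hxv⟩
        rcases hNQ x hreach with h | h
        · exact absurd h hxv
        · exact ⟨h, fun hrch => hxv ((h1 x).2 hrch)⟩
      · rintro ⟨hns, hnr⟩
        have hxv : x ∉ vis := fun hv => hnr ((h1 x).1 hv)
        rcases hNS' x hns with h | h
        · exact absurd h hxv
        · exact ⟨h, hxv⟩
    have hvis'NS : ∀ x, x ∈ vis' ↔ (x ∈ reached ∨ x ∈ pvNewStops reached rem) := by
      intro x
      rw [hvis' x]
      constructor
      · rintro (h | h)
        · exact Or.inl ((h1 x).1 h)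
        · rcases hNQ x h with h' | h'
          · exact Or.inl ((h1 x).1 h')
          · exact Or.inr h'
      · rintro (h | h)
        · exact Or.inl ((h1 x).2 h)
        · rcases hNS' x h with h' | h'
          · exact Or.inl h'
          · exact Or.inr h'
    rw [hA, pvRounds]
    by_cases ht : target ∈ pvNewStops reached rem
    · rw [if_pos ht]
      have htq : target ∈ q' :=
        (hq'NS target).2 ⟨ht, fun hrch => h3 ((h1 target).2 hrch)⟩
      obtain ⟨f', rfl⟩ : ∃ f', f = f' + 1 := ⟨f - 1, by omega⟩
      simp only [pvBfs]
      rw [if_neg (List.ne_nil_of_mem htq),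
        pvLevel_none routes (pvGraph routes) target q' ([], vis') htq]
    · rw [if_neg ht]
      by_cases hall : (pvNewStops reached rem).all (fun s => PySem.Set.contains reached s) = true
      · rw [if_pos hall]
        have hq'nil : q' = [] := by
          apply List.eq_nil_iff_forall_not_mem.2
          intro x hx
          have hx' := (hq'NS x).1 hx
          exact hx'.2 ((pvContains_iff _ _).1 (List.all_eq_true.1 hall x hx'.1))
        obtain ⟨f', rfl⟩ : ∃ f', f = f' + 1 := ⟨f - 1, by omega⟩
        rw [hq'nil]
        simp [pvBfs]
      · rw [if_neg hall]
        have hx : ∃ x ∈ pvNewStops reached rem, x ∉ reached := by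
          by_contra hcon
          refine hall (List.all_eq_true.2 fun x hxNS => (pvContains_iff _ _).2 ?_)
          by_contra hmem
          exact hcon ⟨x, hxNS, hmem⟩
        obtain ⟨x0, hx0NS, hx0r⟩ := hx
        have hq'ne : q' ≠ [] := List.ne_nil_of_mem ((hq'NS x0).2 ⟨hx0NS, hx0r⟩)
        have hrem' : (pvRest reached rem).length < rem.length := by
          have hx0 := hx0NS
          rw [pvNewStops_mem] at hx0
          obtain ⟨r, hr, ⟨s, hs1, hs2⟩, _⟩ := hx0
          refine List.length_filter_lt_length_iff_exists.mpr ⟨r, hr, ?_⟩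
          have ht' : pvTouches reached r = true := by
            rw [pvTouches, List.any_eq_true]
            exact ⟨s, hs1, (pvContains_iff _ _).2 hs2⟩
          simp [ht']
        apply ih
        · intro x
          rw [hvis'NS x, pvFoldAdd_mem]
        · intro x hxq'
          rw [hvis'NS x]
          exact Or.inr ((hq'NS x).1 hxq').1
        · intro htv
          rcases (hvis'NS target).1 htv with h | h
          · exact h3 ((h1 target).2 h)
          · exact ht h
        · intro r hr
          exact h4 r (List.mem_of_mem_filter hr)
        · intro r hr s hs hsv
          have hrrem : r ∈ rem := List.mem_of_mem_filter hr
          have hnt : pvTouches reached r = false := by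
            have h' := (List.mem_filter.1 hr).2
            simpa using h'
          have hsreach : s ∉ reached := by
            intro hsre
            have h' : pvTouches reached r = true := by
              rw [pvTouches, List.any_eq_true]
              exact ⟨s, hs, (pvContains_iff _ _).2 hsre⟩
            rw [hnt] at h'
            cases h'
          rcases (hvis'NS s).1 hsv with h | h
          · exact absurd h hsreach
          · exact (hq'NS s).2 ⟨h, hsreach⟩
        · intro k hk
          rcases h6 k hk with hin | hsub
          · by_cases hre : routes.getD k [] ∈ pvRest reached rem
            · exact Or.inl hre
            · right
              intro s hs
              have htk : pvTouches reached (routes.getD k []) = true := by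
                rcases Bool.eq_false_or_eq_true (pvTouches reached (routes.getD k [])) with h' | h'
                · exact h'
                · refine absurd (List.mem_filter.2 ⟨hin, ?_⟩) hre
                  rw [h']
                  rfl
              have hsNS : s ∈ pvNewStops reached rem := by
                rw [pvNewStops_mem]
                rw [pvTouches, List.any_eq_true] at htk
                obtain ⟨t, ht1, ht2⟩ := htk
                exact ⟨routes.getD k [], hin, ⟨t, ht1, (pvContains_iff _ _).1 ht2⟩, hs⟩
              rw [hvis'NS s]
              exact Or.inr hsNS
          · right
            intro s hs
            rw [hvis'NS s]
            exact Or.inl ((h1 s).1 (hsub s hs))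
        · exact hq'ne
        · omega

-- ===== VERDICT (by name: the statement is the Claim_ definition above) =====
set_option maxHeartbeats 1000000 in
theorem numBusesToDestination_spec : Claim_equal_numBusesToDestination := by
  intro routes source target _
  unfold Spec_numBusesToDestination numBusesToDestination numBusesToDestination_alt
  have hadd : PySem.Set.add PySem.Set.empty source = [source] := by
    simp [PySem.Set.add, PySem.Set.empty, PySem.Set.contains]
  rw [hadd]
  rw [show routes.length + 2 = (routes.length + 1) + 1 from rfl]
  by_cases h : source = target
  · rw [if_pos h]
    simp only [pvBfs]
    rw [if_neg (by simp), pvLevel_none routes (pvGraph routes) target [source]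
      ([], [source]) (by simp [h])]
  · rw [if_neg h]
    apply pvMain routes target ((routes.length + 1) + 1) [source] [source] [source] routes 0
    · intro x; exact Iff.rfl
    · intro x hx; exact hx
    · intro hx
      rcases List.mem_singleton.1 hx with h'
      exact h h'.symm
    · intro r hr; exact hr
    · intro r _ s _ hs; exact hs
    · intro k hk
      left
      rw [List.getD_eq_getElem _ _ hk]
      exact List.getElem_mem hk
    · exact List.cons_ne_nil _ _
    · omega
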